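-- pv_equiv track=rewrite | github.com/C-Kernel-Engine/C-Kernel-Engine | version/v6.6/scripts/build_ir_v6_6_legacy.py | validate_kernel_registry
-- ===== SOURCE A (Python) =====
-- from typing import Any, Dict, List, Optional, Tuple
--
-- def validate_kernel_registry(registry: Dict[str, Dict]) -> Tuple[bool, str]:
--     """Validate that kernel registry is loaded and has kernels.
--
--     Returns:
--         (ok, message) tuple.
--     """
--     if not registry:
--         return False, "Kernel registry is empty or not loaded"
--
--     kernel_count = len(registry)
--     if kernel_count == 0:
--         return False, "Kernel registry has no kernels"
--
--     # Count by op type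
--     ops = {}
--     for k, v in registry.items():
--         op = v.get("op", "unknown")
--         ops[op] = ops.get(op, 0) + 1
--
--     op_summary = ", ".join(f"{op}:{count}" for op, count in sorted(ops.items()))
--     return True, f"Kernel registry valid: {kernel_count} kernels ({op_summary})"
-- ===== SOURCE B (Python) =====
-- def validate_kernel_registry(registry):
--     """Validate that kernel registry is loaded and has kernels.
--
--     Returns:
--         (ok, message) tuple.
--     """
--     if not registry:
--         return False, "Kernel registry is empty or not loaded"
--
--     kernel_count = len(registry)
--     if kernel_count == 0:
--         return False, "Kernel registry has no kernels"
--
--     # Sort all op labels, then emit one "op:count" per run of equal labels.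
--     labels = sorted(v.get("op", "unknown") for v in registry.values())
--     parts = []
--     i = 0
--     n = len(labels)
--     while i < n:
--         j = i
--         while j < n and labels[j] == labels[i]:
--             j += 1
--         parts.append(f"{labels[i]}:{j - i}")
--         i = j
--     op_summary = ", ".join(parts)
--     return True, f"Kernel registry valid: {kernel_count} kernels ({op_summary})"
-- ===== Notes on version B (the rewrite author's own statement) =====
-- stated objective: alternative
-- what changed: Replaces A's hash-count-then-sort-keys (build a dict of op counts, then sort its items) by sort-all-then-group: sort the flat list of op labels once and emit one 'op:count' per run of equal labels in a single scan, so no counting dict exists at all.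
import Mathlib
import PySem

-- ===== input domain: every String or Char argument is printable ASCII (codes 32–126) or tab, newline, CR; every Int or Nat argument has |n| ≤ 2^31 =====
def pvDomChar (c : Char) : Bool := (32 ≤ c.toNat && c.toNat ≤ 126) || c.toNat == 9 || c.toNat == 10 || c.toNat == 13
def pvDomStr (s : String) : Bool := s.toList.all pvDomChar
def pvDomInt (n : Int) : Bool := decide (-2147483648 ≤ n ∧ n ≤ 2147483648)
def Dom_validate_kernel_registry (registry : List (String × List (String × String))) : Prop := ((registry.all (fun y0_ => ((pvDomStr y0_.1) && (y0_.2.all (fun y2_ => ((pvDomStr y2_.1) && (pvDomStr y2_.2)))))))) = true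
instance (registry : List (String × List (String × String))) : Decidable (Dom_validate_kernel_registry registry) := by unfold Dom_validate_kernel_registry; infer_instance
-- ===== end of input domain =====

-- B replaces A's count-in-a-dict-then-sort-keys by sort-all-labels-then-group-runs (alternative algorithm, same cost class).

-- ===== PORT A =====
-- v.get("op", "unknown") on the inner dict
def pvOpLabel (kv : String × List (String × String)) : String :=
  (PySem.Dict.mk kv.2).getD "op" "unknown"

def validate_kernel_registry (registry : List (String × List (String × String))) : Bool × String :=
  if registry = [] then (false, "Kernel registry is empty or not loaded")
  else
    let kernel_count : Int := (registry.length : Int)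
    if kernel_count = 0 then (false, "Kernel registry has no kernels")
    else
      -- ops[op] = ops.get(op, 0) + 1 over registry.items()
      let ops : PySem.Dict String Int :=
        registry.foldl (fun d kv => d.insert (pvOpLabel kv) (d.getD (pvOpLabel kv) 0 + 1)) PySem.Dict.empty
      -- sorted(ops.items()): the dict's keys are distinct, so Python's tuple sort is the sort by first component
      let op_summary : String :=
        PySem.Str.join ", " ((PySem.List.sorted ops.items (fun p => p.1) false).map
          (fun p => p.1 ++ ":" ++ PySem.Int.toStr p.2))
      (true, "Kernel registry valid: " ++ PySem.Int.toStr kernel_count ++ " kernels (" ++ op_summary ++ ")")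

-- ===== PORT B =====
-- the inner while loop: scan j past the run of labels equal to labels[i], emit "label:(j-i)", continue at j
def pvGroupRuns : List String → List String
  | [] => []
  | x :: rest =>
    (x ++ ":" ++ PySem.Int.toStr (1 + (rest.takeWhile (fun y => y == x)).length))
      :: pvGroupRuns (rest.dropWhile (fun y => y == x))
  termination_by s => s.length
  decreasing_by
    exact Nat.lt_succ_of_le (List.length_dropWhile_le _ _)

def validate_kernel_registry_alt (registry : List (String × List (String × String))) : Bool × String :=
  if registry = [] then (false, "Kernel registry is empty or not loaded")
  else
    let kernel_count : Int := (registry.length : Int)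
    if kernel_count = 0 then (false, "Kernel registry has no kernels")
    else
      let labels : List String := PySem.List.sorted (registry.map pvOpLabel) (fun x => x) false
      let op_summary : String := PySem.Str.join ", " (pvGroupRuns labels)
      (true, "Kernel registry valid: " ++ PySem.Int.toStr kernel_count ++ " kernels (" ++ op_summary ++ ")")

-- ===== PRECONDITION & SPEC =====
def Spec_validate_kernel_registry (registry : List (String × List (String × String))) (out : Bool × String) : Prop := out = validate_kernel_registry_alt registry
instance (registry : List (String × List (String × String))) (out : Bool × String) : Decidable (Spec_validate_kernel_registry registry out) := by unfold Spec_validate_kernel_registry; infer_instance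

-- ===== CLAIM (what is proved, stated in full; the proofs are below) =====
def Claim_equal_validate_kernel_registry : Prop := ∀ (registry : List (String × List (String × String))), Dom_validate_kernel_registry registry → Spec_validate_kernel_registry registry (validate_kernel_registry registry)

-- ===== LEMMAS AND PROOFS =====

-- proof-side skeleton of B's scan: the first element of each run
def pvRunHeads : List String → List String
  | [] => []
  | x :: rest => x :: pvRunHeads (rest.dropWhile (fun y => y == x))
  termination_by s => s.length
  decreasing_by
    exact Nat.lt_succ_of_le (List.length_dropWhile_le _ _)

theorem pv_lt_of_mem_drop (x : String) :
    ∀ (rest : List String), (∀ a ∈ rest, x ≤ a) → rest.Pairwise (· ≤ ·) →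
      ∀ k ∈ rest.dropWhile (fun y => y == x), x < k := by
  intro rest
  induction rest with
  | nil => simp
  | cons a t ih =>
    intro hx hp k hk
    rcases List.pairwise_cons.mp hp with ⟨hat, hpt⟩
    by_cases hax : (a == x) = true
    · rw [List.dropWhile_cons, if_pos hax] at hk
      exact ih (fun b hb => hx b (List.mem_cons_of_mem a hb)) hpt k hk
    · rw [List.dropWhile_cons, if_neg hax] at hk
      have hxa : x < a := lt_of_le_of_ne (hx a (by simp)) (fun h => hax (by simp [h.symm]))
      rcases List.mem_cons.mp hk with rfl | hkt
      · exact hxa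
      · exact lt_of_lt_of_le hxa (hat k hkt)

theorem pv_runHeads_mem : ∀ (s : List String) (y : String), y ∈ pvRunHeads s ↔ y ∈ s := by
  intro s
  induction s using pvRunHeads.induct with
  | case1 => simp [pvRunHeads]
  | case2 x rest ih =>
    intro y
    rw [pvRunHeads]
    constructor
    · intro hy
      rcases List.mem_cons.mp hy with rfl | hy'
      · exact List.mem_cons_self
      · exact List.mem_cons_of_mem x ((List.dropWhile_sublist _).mem ((ih y).mp hy'))
    · intro hy
      rcases List.mem_cons.mp hy with rfl | hy'
      · exact List.mem_cons_self
      · rw [← List.takeWhile_append_dropWhile (p := fun z => z == x) (l := rest)] at hy'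
        rcases List.mem_append.mp hy' with hrun | hdrop
        · have : y = x := by simpa using List.mem_takeWhile_imp hrun
          simp [this]
        · exact List.mem_cons_of_mem x ((ih y).mpr hdrop)

theorem pv_runHeads_pairwise : ∀ (s : List String), s.Pairwise (· ≤ ·) →
    (pvRunHeads s).Pairwise (· < ·) := by
  intro s
  induction s using pvRunHeads.induct with
  | case1 => simp [pvRunHeads]
  | case2 x rest ih =>
    intro hp
    rcases List.pairwise_cons.mp hp with ⟨hx, hrest⟩
    have hdp : (rest.dropWhile (fun y => y == x)).Pairwise (· ≤ ·) :=
      hrest.sublist (List.dropWhile_sublist _)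
    rw [pvRunHeads, List.pairwise_cons]
    refine ⟨fun k hk => ?_, ih hdp⟩
    exact pv_lt_of_mem_drop x rest hx hrest k ((pv_runHeads_mem _ k).mp hk)

theorem pv_groupRuns_spec : ∀ (s : List String), s.Pairwise (· ≤ ·) →
    pvGroupRuns s = (pvRunHeads s).map
      (fun k => k ++ ":" ++ PySem.Int.toStr ((s.count k : Int))) := by
  intro s
  induction s using pvRunHeads.induct with
  | case1 => simp [pvGroupRuns, pvRunHeads]
  | case2 x rest ih =>
    intro hp
    rcases List.pairwise_cons.mp hp with ⟨hx, hrest⟩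
    have hdp : (rest.dropWhile (fun y => y == x)).Pairwise (· ≤ ·) :=
      hrest.sublist (List.dropWhile_sublist _)
    have hlt := pv_lt_of_mem_drop x rest hx hrest
    have hsplit : rest = rest.takeWhile (fun y => y == x) ++ rest.dropWhile (fun y => y == x) :=
      (List.takeWhile_append_dropWhile).symm
    rw [pvGroupRuns, pvRunHeads, List.map_cons]
    congr 1
    · -- head: 1 + run length = count of x in x :: rest
      have hrun : (rest.takeWhile (fun y => y == x)).count x
          = (rest.takeWhile (fun y => y == x)).length := by
        apply List.count_eq_length.mpr
        intro b hb
        have : b = x := by simpa using List.mem_takeWhile_imp hb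
        simp [this]
      have hdrop0 : (rest.dropWhile (fun y => y == x)).count x = 0 :=
        List.count_eq_zero.mpr (fun hmem => lt_irrefl x (hlt x hmem))
      have hrc : rest.count x = (rest.takeWhile (fun y => y == x)).length := by
        conv_lhs => rw [hsplit]
        rw [List.count_append, hrun, hdrop0]
        omega
      have hcnt : (((x :: rest).count x : Nat) : Int)
          = 1 + ((rest.takeWhile (fun y => y == x)).length : Int) := by
        rw [List.count_cons_self, hrc]
        push_cast
        ring
      rw [hcnt]
    · -- tail: counts of later heads ignore the first run
      rw [ih hdp]
      apply List.map_congr_left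
      intro k hk
      have hkmem : k ∈ rest.dropWhile (fun y => y == x) := (pv_runHeads_mem _ k).mp hk
      have hkx : x < k := hlt k hkmem
      have hne : k ≠ x := ne_of_gt hkx
      have h1 : (x :: rest).count k = rest.count k := by
        simp [hne.symm]
      have h2 : (rest.takeWhile (fun y => y == x)).count k = 0 := by
        apply List.count_eq_zero.mpr
        intro hmem
        have : k = x := by simpa using List.mem_takeWhile_imp hmem
        exact absurd this hne
      have : (x :: rest).count k = (rest.dropWhile (fun y => y == x)).count k := by
        rw [h1]
        conv_lhs => rw [hsplit]
        rw [List.count_append, h2]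
        omega
      rw [this]

theorem main_lemma (L : List String) :
    (PySem.List.sorted ((L.foldl (fun d x => d.insert x (d.getD x 0 + 1)) PySem.Dict.empty : PySem.Dict String Int).items) (fun p => p.1) false).map
      (fun p => p.1 ++ ":" ++ PySem.Int.toStr p.2)
    = pvGroupRuns (PySem.List.sorted L (fun x => x) false) := by
  rw [PySem.Dict.foldl_insert_getD_add_one_eq_counter, PySem.Dict.items_counter]
  -- sort the items of the counter = map the pair-builder over the sorted distinct labels
  have hS : PySem.List.sorted ((PySem.Set.ofList L).map (fun k => (k, ((L.count k : Nat) : Int)))) (fun p => p.1) false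
      = (PySem.List.sorted (PySem.Set.ofList L) (fun x => x) false).map (fun k => (k, ((L.count k : Nat) : Int))) := by
    apply PySem.List.sorted_eq_of_perm_of_pairwise_lt
    · exact (PySem.List.sorted_perm _ _ _).map _
    · rw [List.pairwise_map]
      exact PySem.List.sorted_ofList_pairwise_lt L
  -- sorted distinct labels = run heads of the sorted label list
  have hR : PySem.List.sorted (PySem.Set.ofList L) (fun x => x) false
      = pvRunHeads (PySem.List.sorted L (fun x => x) false) := by
    apply PySem.List.sorted_eq_of_perm_of_pairwise_lt
    · apply (List.perm_ext_iff_of_nodup ?_ (PySem.Set.nodup_ofList L)).mpr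
      · intro a
        rw [pv_runHeads_mem, PySem.List.mem_sorted, PySem.Set.mem_ofList]
      · exact (pv_runHeads_pairwise _ (PySem.List.sorted_pairwise L (fun x => x))).imp ne_of_lt
    · exact pv_runHeads_pairwise _ (PySem.List.sorted_pairwise L (fun x => x))
  rw [hS, List.map_map, hR,
    pv_groupRuns_spec _ (PySem.List.sorted_pairwise L (fun x => x))]
  apply List.map_congr_left
  intro k _
  have : (PySem.List.sorted L (fun x => x) false).count k = L.count k :=
    (PySem.List.sorted_perm L (fun x => x) false).count_eq k
  simp [Function.comp, this]

-- ===== VERDICT (by name: the statement is the Claim_ definition above) =====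
theorem validate_kernel_registry_spec : Claim_equal_validate_kernel_registry := by
  intro registry _
  unfold Spec_validate_kernel_registry validate_kernel_registry validate_kernel_registry_alt
  by_cases h : registry = []
  · simp [h]
  · simp only [h, if_false]
    have hlen : (registry.length : Int) ≠ 0 := by
      intro hc
      exact h (List.length_eq_zero_iff.mp (by exact_mod_cast hc))
    simp only [hlen, if_false]
    have := main_lemma (registry.map pvOpLabel)
    rw [List.foldl_map] at this
    rw [this]
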